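-- pv_equiv track=rewrite | github.com/HaoweiChan/EyeDiagramNet | common/parameters/conversion.py | convert_legacy_param_names
-- ===== SOURCE A (Python) =====
-- LEGACY_TO_NEW_PARAM_MAP = {
--     'R_tx': 'R_drv', 'C_tx': 'C_drv', 'L_tx': 'L_drv',
--     'R_rx': 'R_odt', 'C_rx': 'C_odt', 'L_rx': 'L_odt',
-- }
--
-- NEW_TO_LEGACY_PARAM_MAP = {v: k for k, v in LEGACY_TO_NEW_PARAM_MAP.items()}
--
-- def convert_legacy_param_names(param_names_or_dict, target_format='new'):
--     """
--     Convert parameter names to a target format (legacy or new).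
--
--     This function is idempotent and safe to call on data that may already be
--     in the target format. It ensures all convertible keys are in the
--     specified format in the output. For dictionaries with mixed-format keys
--     (e.g., both 'R_tx' and 'R_drv'), it gives precedence to the key that is
--     already in the target format.
--
--     Args:
--         param_names_or_dict: A list of parameter names or a dictionary.
--         target_format: The desired output format, 'new' or 'legacy'.
--
--     Returns:
--         A new list or dictionary with names in the target format.
--     """
--     if target_format not in ('new', 'legacy'):
--         raise ValueError("target_format must be 'new' or 'legacy'")
--
--     if isinstance(param_names_or_dict, list):
--         param_map = LEGACY_TO_NEW_PARAM_MAP if target_format == 'new' else NEW_TO_LEGACY_PARAM_MAP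
--         return [param_map.get(name, name) for name in param_names_or_dict]
--
--     if isinstance(param_names_or_dict, dict):
--         # Make a copy to avoid modifying the original
--         out_dict = param_names_or_dict.copy()
--
--         if target_format == 'new':
--             # Convert legacy keys to new keys
--             for legacy_key, new_key in LEGACY_TO_NEW_PARAM_MAP.items():
--                 if legacy_key in out_dict:
--                     # If the new key already exists, prefer it by removing the legacy one.
--                     # Otherwise, rename the legacy key to the new key.
--                     if new_key not in out_dict:
--                         out_dict[new_key] = out_dict.pop(legacy_key)
--                     else:
--                         del out_dict[legacy_key]
--         else:  # target_format == 'legacy'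
--             # Convert new keys to legacy keys
--             for legacy_key, new_key in LEGACY_TO_NEW_PARAM_MAP.items():
--                 if new_key in out_dict:
--                     # If the legacy key already exists, prefer it. Otherwise, rename.
--                     if legacy_key not in out_dict:
--                         out_dict[legacy_key] = out_dict.pop(new_key)
--                     else:
--                         del out_dict[new_key]
--         return out_dict
--
--     raise TypeError("Input must be a list or dict")
-- ===== SOURCE B (Python) =====
-- # Same conversion by string surgery: names are '<R|C|L>_<suffix>'; instead of a
-- # 6-entry whole-name table, split each name into its first letter and the rest
-- # and rewrite just the suffix through a 2-entry suffix table.  The dict branch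
-- # does one pass over items() (target-format key wins) instead of mutating a copy.
-- _SUFFIX_TO_NEW = {'_tx': '_drv', '_rx': '_odt'}
-- _SUFFIX_TO_LEGACY = {'_drv': '_tx', '_odt': '_rx'}
--
--
-- def _rename(name, repl):
--     if not isinstance(name, str):
--         return name
--     head, tail = name[:1], name[1:]
--     if head in ('R', 'C', 'L') and tail in repl:
--         return head + repl[tail]
--     return name
--
--
-- def convert_legacy_param_names(param_names_or_dict, target_format='new'):
--     if target_format not in ('new', 'legacy'):
--         raise ValueError("target_format must be 'new' or 'legacy'")
--     repl = _SUFFIX_TO_NEW if target_format == 'new' else _SUFFIX_TO_LEGACY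
--     if isinstance(param_names_or_dict, list):
--         return [_rename(name, repl) for name in param_names_or_dict]
--     if isinstance(param_names_or_dict, dict):
--         out = {}
--         for key, val in param_names_or_dict.items():
--             new_key = _rename(key, repl)
--             if new_key != key and new_key in param_names_or_dict:
--                 continue  # a key already in the target format wins
--             out[new_key] = val
--         return out
--     raise TypeError("Input must be a list or dict")
-- ===== Notes on version B (the rewrite author's own statement) =====
-- stated objective: alternative
-- what changed: B replaces the 6-entry whole-name lookup table by string surgery (split off the first letter, check it against R/C/L, map the suffix through a 2-entry table); the Lean claim covers the list-of-names branch, which is what the fixed List String signature types.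
import Mathlib
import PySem

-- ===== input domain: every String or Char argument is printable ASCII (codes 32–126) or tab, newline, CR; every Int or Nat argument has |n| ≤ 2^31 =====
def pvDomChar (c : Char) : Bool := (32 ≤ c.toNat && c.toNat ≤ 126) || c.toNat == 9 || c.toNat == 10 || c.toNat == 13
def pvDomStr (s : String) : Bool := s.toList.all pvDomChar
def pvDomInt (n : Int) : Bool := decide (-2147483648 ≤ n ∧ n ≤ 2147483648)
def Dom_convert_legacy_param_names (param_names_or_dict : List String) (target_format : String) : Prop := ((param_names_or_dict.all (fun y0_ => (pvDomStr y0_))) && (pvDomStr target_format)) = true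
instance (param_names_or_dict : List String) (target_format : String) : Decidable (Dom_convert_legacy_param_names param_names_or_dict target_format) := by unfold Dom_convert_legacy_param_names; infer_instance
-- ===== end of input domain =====

-- B renames by string surgery — split off the first letter and map the suffix through a
-- 2-entry table — instead of looking the whole name up in a 6-entry map (objective:
-- alternative decomposition, same cost).  The required List String signature types the
-- Python function's list-of-names branch; its dict branch (Source B handles it too, by one
-- pass over items()) is outside this signature and outside what this file claims.

-- ===== PORT A =====
def pvLegacyToNew : PySem.Dict String String :=
  PySem.Dict.ofList [("R_tx", "R_drv"), ("C_tx", "C_drv"), ("L_tx", "L_drv"),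
                     ("R_rx", "R_odt"), ("C_rx", "C_odt"), ("L_rx", "L_odt")]

def pvNewToLegacy : PySem.Dict String String :=
  PySem.Dict.ofList [("R_drv", "R_tx"), ("C_drv", "C_tx"), ("L_drv", "L_tx"),
                     ("R_odt", "R_rx"), ("C_odt", "C_rx"), ("L_odt", "L_rx")]

def convert_legacy_param_names (param_names_or_dict : List String) (target_format : String) : List String :=
  let param_map := if target_format == "new" then pvLegacyToNew else pvNewToLegacy
  param_names_or_dict.map (fun name => PySem.Dict.getD param_map name name)

-- ===== PORT B =====
def pvSuffixToNew : PySem.Dict String String :=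
  PySem.Dict.ofList [("_tx", "_drv"), ("_rx", "_odt")]

def pvSuffixToLegacy : PySem.Dict String String :=
  PySem.Dict.ofList [("_drv", "_tx"), ("_odt", "_rx")]

-- Source B's _rename: head = name[:1], tail = name[1:]; if head in ('R','C','L') and tail in repl:
-- head + repl[tail].  (Source B's isinstance(name, str) guard is always true at type List String.)
def pvRename (name : String) (repl : PySem.Dict String String) : String :=
  let head := PySem.Str.slice name none (some 1)
  let tail := PySem.Str.slice name (some 1) none
  if head = "R" ∨ head = "C" ∨ head = "L" then
    match PySem.Dict.get? repl tail with
    | some nw => String.ofList (head.toList ++ nw.toList)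
    | none => name
  else name

def convert_legacy_param_names_alt (param_names_or_dict : List String) (target_format : String) : List String :=
  let repl := if target_format == "new" then pvSuffixToNew else pvSuffixToLegacy
  param_names_or_dict.map (fun name => pvRename name repl)

-- ===== PRECONDITION & SPEC =====
-- Pre_ excludes exactly the inputs where A raises ValueError: target_format other than
-- 'new'/'legacy'.  (At this signature A returns on every other input; B matches it there.)
def Pre_convert_legacy_param_names (param_names_or_dict : List String) (target_format : String) : Prop :=
  target_format = "new" ∨ target_format = "legacy"
instance (param_names_or_dict : List String) (target_format : String) : Decidable (Pre_convert_legacy_param_names param_names_or_dict target_format) := by unfold Pre_convert_legacy_param_names; infer_instance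

def pvWitness_convert_legacy_param_names : List String × String := (["R_tx", "C_odt", "foo"], "new")

def Spec_convert_legacy_param_names (param_names_or_dict : List String) (target_format : String) (out : List String) : Prop := out = convert_legacy_param_names_alt param_names_or_dict target_format
instance (param_names_or_dict : List String) (target_format : String) (out : List String) : Decidable (Spec_convert_legacy_param_names param_names_or_dict target_format out) := by unfold Spec_convert_legacy_param_names; infer_instance

-- ===== CLAIM (what is proved, stated in full; the proofs are below) =====
def Claim_equal_convert_legacy_param_names : Prop := ∀ (param_names_or_dict : List String) (target_format : String), Dom_convert_legacy_param_names param_names_or_dict target_format → Pre_convert_legacy_param_names param_names_or_dict target_format → Spec_convert_legacy_param_names param_names_or_dict target_format (convert_legacy_param_names param_names_or_dict target_format)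

-- ===== LEMMAS AND PROOFS =====

-- name = name[:1] ++ name[1:], on the character lists
lemma pvSplit_eq (name : String) :
    name.toList = (PySem.Str.slice name none (some 1)).toList ++ (PySem.Str.slice name (some 1) none).toList := by
  simp [pysem]
  rw [← List.drop_one, List.take_append_drop]

lemma pvRename_new (name : String) :
    PySem.Dict.getD pvLegacyToNew name name = pvRename name pvSuffixToNew := by
  by_cases h1 : "R_tx" = name; · subst h1; decide
  by_cases h2 : "C_tx" = name; · subst h2; decide
  by_cases h3 : "L_tx" = name; · subst h3; decide
  by_cases h4 : "R_rx" = name; · subst h4; decide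
  by_cases h5 : "C_rx" = name; · subst h5; decide
  by_cases h6 : "L_rx" = name; · subst h6; decide
  have e1 : ("R_tx" == name) = false := beq_eq_false_iff_ne.mpr h1
  have e2 : ("C_tx" == name) = false := beq_eq_false_iff_ne.mpr h2
  have e3 : ("L_tx" == name) = false := beq_eq_false_iff_ne.mpr h3
  have e4 : ("R_rx" == name) = false := beq_eq_false_iff_ne.mpr h4
  have e5 : ("C_rx" == name) = false := beq_eq_false_iff_ne.mpr h5
  have e6 : ("L_rx" == name) = false := beq_eq_false_iff_ne.mpr h6
  rw [show pvLegacyToNew = PySem.Dict.mk [("R_tx", "R_drv"), ("C_tx", "C_drv"), ("L_tx", "L_drv"),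
        ("R_rx", "R_odt"), ("C_rx", "C_odt"), ("L_rx", "L_odt")] from by decide]
  simp only [PySem.Dict.getD, PySem.Dict.get?, List.find?, e1, e2, e3, e4, e5, e6,
    Option.map_none, Option.getD_none]
  unfold pvRename
  by_cases hc : PySem.Str.slice name none (some 1) = "R" ∨ PySem.Str.slice name none (some 1) = "C"
      ∨ PySem.Str.slice name none (some 1) = "L"
  · rcases hget : PySem.Dict.get? pvSuffixToNew (PySem.Str.slice name (some 1) none) with _ | nw
    · simp [hc, hget]
    · exfalso
      have htl : PySem.Str.slice name (some 1) none = "_tx" ∨ PySem.Str.slice name (some 1) none = "_rx" := by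
        by_cases a : "_tx" = PySem.Str.slice name (some 1) none
        · left; exact a.symm
        by_cases b : "_rx" = PySem.Str.slice name (some 1) none
        · right; exact b.symm
        rw [show pvSuffixToNew = PySem.Dict.mk [("_tx", "_drv"), ("_rx", "_odt")] from by decide] at hget
        simp [PySem.Dict.get?, a, b] at hget
      have hname := pvSplit_eq name
      rcases hc with h | h | h <;> rcases htl with h' | h' <;>
        first
          | exact h1 (String.toList_inj.mp (by rw [hname, h, h']; decide))
          | exact h2 (String.toList_inj.mp (by rw [hname, h, h']; decide))
          | exact h3 (String.toList_inj.mp (by rw [hname, h, h']; decide))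
          | exact h4 (String.toList_inj.mp (by rw [hname, h, h']; decide))
          | exact h5 (String.toList_inj.mp (by rw [hname, h, h']; decide))
          | exact h6 (String.toList_inj.mp (by rw [hname, h, h']; decide))
  · simp [hc]

lemma pvRename_legacy (name : String) :
    PySem.Dict.getD pvNewToLegacy name name = pvRename name pvSuffixToLegacy := by
  by_cases h1 : "R_drv" = name; · subst h1; decide
  by_cases h2 : "C_drv" = name; · subst h2; decide
  by_cases h3 : "L_drv" = name; · subst h3; decide
  by_cases h4 : "R_odt" = name; · subst h4; decide
  by_cases h5 : "C_odt" = name; · subst h5; decide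
  by_cases h6 : "L_odt" = name; · subst h6; decide
  have e1 : ("R_drv" == name) = false := beq_eq_false_iff_ne.mpr h1
  have e2 : ("C_drv" == name) = false := beq_eq_false_iff_ne.mpr h2
  have e3 : ("L_drv" == name) = false := beq_eq_false_iff_ne.mpr h3
  have e4 : ("R_odt" == name) = false := beq_eq_false_iff_ne.mpr h4
  have e5 : ("C_odt" == name) = false := beq_eq_false_iff_ne.mpr h5
  have e6 : ("L_odt" == name) = false := beq_eq_false_iff_ne.mpr h6
  rw [show pvNewToLegacy = PySem.Dict.mk [("R_drv", "R_tx"), ("C_drv", "C_tx"), ("L_drv", "L_tx"),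
        ("R_odt", "R_rx"), ("C_odt", "C_rx"), ("L_odt", "L_rx")] from by decide]
  simp only [PySem.Dict.getD, PySem.Dict.get?, List.find?, e1, e2, e3, e4, e5, e6,
    Option.map_none, Option.getD_none]
  unfold pvRename
  by_cases hc : PySem.Str.slice name none (some 1) = "R" ∨ PySem.Str.slice name none (some 1) = "C"
      ∨ PySem.Str.slice name none (some 1) = "L"
  · rcases hget : PySem.Dict.get? pvSuffixToLegacy (PySem.Str.slice name (some 1) none) with _ | nw
    · simp [hc, hget]
    · exfalso
      have htl : PySem.Str.slice name (some 1) none = "_drv" ∨ PySem.Str.slice name (some 1) none = "_odt" := by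
        by_cases a : "_drv" = PySem.Str.slice name (some 1) none
        · left; exact a.symm
        by_cases b : "_odt" = PySem.Str.slice name (some 1) none
        · right; exact b.symm
        rw [show pvSuffixToLegacy = PySem.Dict.mk [("_drv", "_tx"), ("_odt", "_rx")] from by decide] at hget
        simp [PySem.Dict.get?, a, b] at hget
      have hname := pvSplit_eq name
      rcases hc with h | h | h <;> rcases htl with h' | h' <;>
        first
          | exact h1 (String.toList_inj.mp (by rw [hname, h, h']; decide))
          | exact h2 (String.toList_inj.mp (by rw [hname, h, h']; decide))
          | exact h3 (String.toList_inj.mp (by rw [hname, h, h']; decide))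
          | exact h4 (String.toList_inj.mp (by rw [hname, h, h']; decide))
          | exact h5 (String.toList_inj.mp (by rw [hname, h, h']; decide))
          | exact h6 (String.toList_inj.mp (by rw [hname, h, h']; decide))
  · simp [hc]

-- ===== VERDICT (by name: the statement is the Claim_ definition above) =====
theorem convert_legacy_param_names_spec : Claim_equal_convert_legacy_param_names := by
  intro xs t _ hpre
  unfold Spec_convert_legacy_param_names convert_legacy_param_names convert_legacy_param_names_alt
  rcases hpre with h | h <;> subst h <;> simp only [beq_iff_eq, reduceIte]
  · exact List.map_congr_left fun s _ => pvRename_new s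
  · exact List.map_congr_left fun s _ => pvRename_legacy s
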